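-- pv_equiv track=rewrite | github.com/mazziechai/hun-kawaba | main.py | split_compound
-- ===== SOURCE A (Python) =====
-- start_consonants = 'ptkbdgfscljwhm'
--
-- def split_compound(compound):
--     pieces = []
--     piece_start_index = 0
--     for i in range(1, len(compound)):
--         if compound[i] in start_consonants + '\'':
--             if compound[piece_start_index] == '\'':
--                 piece_start_index += 1
--             pieces.append(compound[piece_start_index:i])
--             piece_start_index = i
--     pieces.append(compound[piece_start_index:])
--     return pieces
-- ===== SOURCE B (Python) =====
-- start_consonants = 'ptkbdgfscljwhm'
--
-- def split_compound(compound):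
--     marks = start_consonants + "'"
--     bounds = [0] + [i for i in range(1, len(compound)) if compound[i] in marks]
--     pieces = [compound[s + (compound[s] == "'"):e] for s, e in zip(bounds, bounds[1:])]
--     pieces.append(compound[bounds[-1]:])
--     return pieces
-- ===== Notes on version B (the rewrite author's own statement) =====
-- stated objective: alternative
-- what changed: Replaced A's single stateful loop (carrying piece_start_index and mutating it) by a two-phase decomposition: first compute the list of cut points, then slice between consecutive cut points via zip, with the final piece taken from the last cut point.
import Mathlib
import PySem

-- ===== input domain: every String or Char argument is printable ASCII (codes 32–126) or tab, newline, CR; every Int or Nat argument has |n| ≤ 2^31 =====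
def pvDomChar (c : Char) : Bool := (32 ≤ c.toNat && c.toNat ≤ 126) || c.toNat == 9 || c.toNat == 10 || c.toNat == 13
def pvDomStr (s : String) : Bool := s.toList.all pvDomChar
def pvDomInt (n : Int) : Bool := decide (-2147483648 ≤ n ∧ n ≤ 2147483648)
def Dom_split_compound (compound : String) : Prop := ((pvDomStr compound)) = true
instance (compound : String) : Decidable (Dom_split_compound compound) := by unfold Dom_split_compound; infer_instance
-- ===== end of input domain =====

-- B replaces A's single stateful loop by precomputing the cut-point list and slicing between
-- consecutive cut points (objective: alternative decomposition; same exact output).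

-- membership in start_consonants + "'" (shared by both ports)
def sc_isMark (c : Char) : Bool :=
  c ∈ ['p','t','k','b','d','g','f','s','c','l','j','w','h','m','\'']

-- ===== PORT A =====
def split_compound (compound : String) : List String :=
  let cs := compound.toList
  let res := (PySem.List.pyRange 1 cs.length 1).foldl
    (fun (st : List String × Int) (i : Int) =>
      if sc_isMark (PySem.List.pyGetD cs i ' ') then
        (st.1 ++ [String.ofList (PySem.List.slice cs
              (some (if PySem.List.pyGetD cs st.2 ' ' == '\'' then st.2 + 1 else st.2))
              (some i))],
         i)
      else st)
    ([], 0)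
  res.1 ++ [String.ofList (PySem.List.slice cs (some res.2) none)]

-- ===== PORT B =====
def split_compound_alt (compound : String) : List String :=
  let cs := compound.toList
  let bounds : List Int :=
    0 :: ((PySem.List.pyRange 1 cs.length 1).filter
            (fun i => sc_isMark (PySem.List.pyGetD cs i ' ')))
  let pieces := (bounds.zip bounds.tail).map (fun se =>
    String.ofList (PySem.List.slice cs
      (some (se.1 + (if PySem.List.pyGetD cs se.1 ' ' == '\'' then 1 else 0)))
      (some se.2)))
  pieces ++ [String.ofList (PySem.List.slice cs (some (PySem.List.pyGetD bounds (-1) 0)) none)]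

-- ===== PRECONDITION & SPEC =====
def Spec_split_compound (compound : String) (out : List String) : Prop := out = split_compound_alt compound
instance (compound : String) (out : List String) : Decidable (Spec_split_compound compound out) := by unfold Spec_split_compound; infer_instance

-- ===== CLAIM (what is proved, stated in full; the proofs are below) =====
def Claim_equal_split_compound : Prop := ∀ (compound : String), Dom_split_compound compound → Spec_split_compound compound (split_compound compound)

-- ===== LEMMAS AND PROOFS =====

-- proof-only helper: the list of non-final pieces produced from start s and cut points bs
def scChop (cs : List Char) (s : Int) : List Int → List String
  | [] => []
  | b :: bs =>
      String.ofList (PySem.List.slice cs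
        (some (if PySem.List.pyGetD cs s ' ' == '\'' then s + 1 else s)) (some b))
        :: scChop cs b bs

theorem scFoldA (cs : List Char) (L : List Int) :
    ∀ (pieces : List String) (s : Int),
      (L.foldl (fun (st : List String × Int) (i : Int) =>
        if sc_isMark (PySem.List.pyGetD cs i ' ') then
          (st.1 ++ [String.ofList (PySem.List.slice cs
                (some (if PySem.List.pyGetD cs st.2 ' ' == '\'' then st.2 + 1 else st.2))
                (some i))],
           i)
        else st) (pieces, s))
      = (pieces ++ scChop cs s (L.filter (fun i => sc_isMark (PySem.List.pyGetD cs i ' '))),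
         (L.filter (fun i => sc_isMark (PySem.List.pyGetD cs i ' '))).getLastD s) := by
  induction L with
  | nil => intro pieces s; simp [scChop]
  | cons i L ih =>
      intro pieces s
      by_cases h : sc_isMark (PySem.List.pyGetD cs i ' ') = true
      · simp only [List.foldl_cons, List.filter_cons, h, if_pos, ih, scChop,
          List.getLastD_cons, List.append_assoc, List.singleton_append]
      · simp only [List.foldl_cons, List.filter_cons, h]
        simp only [Bool.false_eq_true, ite_false, ih]

theorem scZipB (cs : List Char) (bs : List Int) :
    ∀ (s : Int),
      (((s :: bs).zip bs).map (fun se =>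
        String.ofList (PySem.List.slice cs
          (some (se.1 + (if PySem.List.pyGetD cs se.1 ' ' == '\'' then 1 else 0)))
          (some se.2))))
      = scChop cs s bs := by
  induction bs with
  | nil => intro s; simp [scChop]
  | cons b bs ih =>
      intro s
      simp only [List.zip_cons_cons, List.map_cons, ih, scChop]
      congr 2
      split_ifs <;> simp

theorem scLastAux (F : List Int) : ∀ (x : Int), (x :: F).getLast (by simp) = F.getLastD x := by
  induction F with
  | nil => intro x; simp
  | cons y F ih =>
      intro x
      rw [List.getLast_cons (by simp), List.getLastD_cons]
      exact ih y

theorem scLast (x : Int) (F : List Int) :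
    PySem.List.pyGetD (x :: F) (-1) 0 = F.getLastD x := by
  rw [PySem.List.pyGetD_neg_one (x :: F) 0 (by simp)]
  exact scLastAux F x

-- ===== VERDICT (by name: the statement is the Claim_ definition above) =====
theorem split_compound_spec : Claim_equal_split_compound := by
  intro compound _
  show _ = _
  unfold split_compound split_compound_alt
  dsimp only
  rw [scFoldA, List.tail_cons, scZipB, scLast]
  simp
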